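-- pv_equiv track=rewrite | github.com/knrdv/stock-finder | utils.py | count_gains
-- ===== SOURCE A (Python) =====
-- def count_gains(gains:tuple, wanted_gain:int, period):
-- 	tmp_gains = [0 for _ in range(len(gains))]
-- 	gains_counter = [0 for _ in range(len(gains))]
-- 	for i in range(len(gains)):
-- 		# Which gains to update
-- 		start_idx = max(0, (i-period+1))
-- 		end_idx = i+1
-- 		for j in range(start_idx, end_idx):
-- 			tmp_gains[j] += gains[i]
-- 			if tmp_gains[j] >= wanted_gain:
-- 				gains_counter[j] += 1
-- 				tmp_gains[j] -= wanted_gain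
-- 	return tuple(gains_counter)
-- ===== SOURCE B (Python) =====
-- def count_gains(gains, wanted_gain, period):
--     n = len(gains)
--     counter = []
--     for j in range(n):
--         acc = 0
--         cnt = 0
--         for k in range(j, min(j + period, n)):
--             acc += gains[k]
--             if acc >= wanted_gain:
--                 cnt += 1
--                 acc -= wanted_gain
--         counter.append(cnt)
--     return tuple(counter)
-- ===== Notes on version B (the rewrite author's own statement) =====
-- stated objective: simpler
-- what changed: B computes each window's count independently with one scalar accumulator per start index (column-major, no arrays of partial sums), instead of A's streaming update of an n-length tmp_gains array for all active windows at every step.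
import Mathlib
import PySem

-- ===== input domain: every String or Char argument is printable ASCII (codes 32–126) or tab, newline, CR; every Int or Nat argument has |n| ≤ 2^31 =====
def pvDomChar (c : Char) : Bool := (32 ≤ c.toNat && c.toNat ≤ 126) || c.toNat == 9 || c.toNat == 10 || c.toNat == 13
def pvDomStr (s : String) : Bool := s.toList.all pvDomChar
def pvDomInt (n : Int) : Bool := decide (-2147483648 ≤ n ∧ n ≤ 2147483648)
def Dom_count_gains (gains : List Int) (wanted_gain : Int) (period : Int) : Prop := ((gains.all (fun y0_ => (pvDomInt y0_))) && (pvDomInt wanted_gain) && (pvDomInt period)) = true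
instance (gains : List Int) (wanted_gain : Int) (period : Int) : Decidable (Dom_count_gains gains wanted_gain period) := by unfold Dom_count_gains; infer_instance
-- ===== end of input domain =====

-- B computes each window's count independently (one scalar accumulator per start index) instead of
-- A's streaming update of an n-length tmp_gains array across all active windows; same results, simpler.

-- ===== PORT A =====
def count_gains (gains : List Int) (wanted_gain : Int) (period : Int) : List Int :=
  let n : Int := (gains.length : Int)
  let tmp_gains : List Int := (PySem.List.pyRange 0 n 1).map (fun _ => (0 : Int))
  let gains_counter : List Int := (PySem.List.pyRange 0 n 1).map (fun _ => (0 : Int))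
  let st :=
    (PySem.List.pyRange 0 n 1).foldl (fun (st : List Int × List Int) i =>
      let start_idx := max 0 (i - period + 1)
      let end_idx := i + 1
      (PySem.List.pyRange start_idx end_idx 1).foldl (fun (st2 : List Int × List Int) j =>
        let tmp := PySem.List.pySetD st2.1 j (PySem.List.pyGetD st2.1 j 0 + PySem.List.pyGetD gains i 0)
        if PySem.List.pyGetD tmp j 0 ≥ wanted_gain then
          (PySem.List.pySetD tmp j (PySem.List.pyGetD tmp j 0 - wanted_gain),
           PySem.List.pySetD st2.2 j (PySem.List.pyGetD st2.2 j 0 + 1))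
        else (tmp, st2.2)) st) (tmp_gains, gains_counter)
  st.2

-- ===== PORT B =====
def count_gains_alt (gains : List Int) (wanted_gain : Int) (period : Int) : List Int :=
  let n : Int := (gains.length : Int)
  (PySem.List.pyRange 0 n 1).foldl (fun (counter : List Int) j =>
    let r :=
      (PySem.List.pyRange j (min (j + period) n) 1).foldl (fun (s : Int × Int) k =>
        let acc := s.1 + PySem.List.pyGetD gains k 0
        if acc ≥ wanted_gain then (acc - wanted_gain, s.2 + 1) else (acc, s.2)) (0, 0)
    counter ++ [r.2]) []

-- ===== PRECONDITION & SPEC =====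
def Spec_count_gains (gains : List Int) (wanted_gain : Int) (period : Int) (out : List Int) : Prop := out = count_gains_alt gains wanted_gain period
instance (gains : List Int) (wanted_gain : Int) (period : Int) (out : List Int) : Decidable (Spec_count_gains gains wanted_gain period out) := by unfold Spec_count_gains; infer_instance

-- ===== CLAIM (what is proved, stated in full; the proofs are below) =====
def Claim_equal_count_gains : Prop := ∀ (gains : List Int) (wanted_gain : Int) (period : Int), Dom_count_gains gains wanted_gain period → Spec_count_gains gains wanted_gain period (count_gains gains wanted_gain period)

-- ===== LEMMAS AND PROOFS =====

-- One threshold-counting step: add g, and if the running sum reached w, count and subtract w.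
def pvStep (w : Int) (s : Int × Int) (g : Int) : Int × Int :=
  let acc := s.1 + g
  if acc ≥ w then (acc - w, s.2 + 1) else (acc, s.2)

-- Length of window [j, min(j+p, m)).
def pvWinLen (p : Int) (j m : Nat) : Nat := ((min ((j : Int) + p) (m : Int)) - (j : Int)).toNat

-- Values feeding window j among the first m gains.
def pvWin (gains : List Int) (p : Int) (j m : Nat) : List Int :=
  (List.range' j (pvWinLen p j m)).map (fun k => gains.getD k 0)

-- The (acc, count) pair of window j after the first m gains have been processed.
def pvRun (w : Int) (gains : List Int) (p : Int) (j m : Nat) : Int × Int :=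
  (pvWin gains p j m).foldl (pvStep w) (0, 0)

-- A's inner-loop body with the added gain abstracted out.
def pvBody (w g : Int) (st2 : List Int × List Int) (j : Int) : List Int × List Int :=
  let tmp := PySem.List.pySetD st2.1 j (PySem.List.pyGetD st2.1 j 0 + g)
  if PySem.List.pyGetD tmp j 0 ≥ w then
    (PySem.List.pySetD tmp j (PySem.List.pyGetD tmp j 0 - w),
     PySem.List.pySetD st2.2 j (PySem.List.pyGetD st2.2 j 0 + 1))
  else (tmp, st2.2)

-- A's state after the first m outer iterations.
def pvAState (gains : List Int) (w p : Int) (m : Nat) : List Int × List Int :=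
  (PySem.List.pyRange 0 (m : Int) 1).foldl (fun (st : List Int × List Int) i =>
      let start_idx := max 0 (i - p + 1)
      let end_idx := i + 1
      (PySem.List.pyRange start_idx end_idx 1).foldl (pvBody w (PySem.List.pyGetD gains i 0)) st)
    ((PySem.List.pyRange 0 (gains.length : Int) 1).map (fun _ => (0 : Int)),
     (PySem.List.pyRange 0 (gains.length : Int) 1).map (fun _ => (0 : Int)))

lemma count_gains_eq_pvAState (gains : List Int) (w p : Int) :
    count_gains gains w p = (pvAState gains w p gains.length).2 := rfl

lemma pvBody_length (w g : Int) (st2 : List Int × List Int) (j : Int) :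
    (pvBody w g st2 j).1.length = st2.1.length ∧ (pvBody w g st2 j).2.length = st2.2.length := by
  by_cases h : PySem.List.pyGetD (PySem.List.pySetD st2.1 j (PySem.List.pyGetD st2.1 j 0 + g)) j 0 ≥ w <;>
    simp [pvBody, h, PySem.List.length_pySetD]

lemma pvFold_length (w g : Int) (L : List Int) (st : List Int × List Int) :
    (L.foldl (pvBody w g) st).1.length = st.1.length ∧
    (L.foldl (pvBody w g) st).2.length = st.2.length := by
  induction L generalizing st with
  | nil => exact ⟨rfl, rfl⟩
  | cons a L ih =>
    simp only [List.foldl_cons]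
    obtain ⟨h1, h2⟩ := pvBody_length w g st a
    obtain ⟨h1', h2'⟩ := ih (pvBody w g st a)
    exact ⟨h1'.trans h1, h2'.trans h2⟩

-- Effect of A's inner loop on the (tmp, counter) entries at each index.
lemma pvInner (w g : Int) (L : List Int) (hnd : L.Nodup)
    (st : List Int × List Int)
    (hL : ∀ x ∈ L, 0 ≤ x ∧ x < (st.1.length : Int) ∧ x < (st.2.length : Int)) (j : Nat) :
    ((L.foldl (pvBody w g) st).1.getD j 0, (L.foldl (pvBody w g) st).2.getD j 0) =
      if (j : Int) ∈ L then pvStep w (st.1.getD j 0, st.2.getD j 0) g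
      else (st.1.getD j 0, st.2.getD j 0) := by
  induction L generalizing st with
  | nil => simp
  | cons a L ih =>
    obtain ⟨ha0, ha1, ha2⟩ := hL a List.mem_cons_self
    obtain ⟨hb1, hb2⟩ := pvBody_length w g st a
    have hni : a ∉ L := (List.nodup_cons.mp hnd).1
    have hL' : ∀ x ∈ L, 0 ≤ x ∧ x < ((pvBody w g st a).1.length : Int) ∧
        x < ((pvBody w g st a).2.length : Int) := by
      intro x hx; rw [hb1, hb2]; exact hL x (List.mem_cons_of_mem _ hx)
    simp only [List.foldl_cons]
    rw [ih ((List.nodup_cons.mp hnd).2) _ hL']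
    by_cases hja : (j : Int) = a
    · have haj : a = (j : Int) := hja.symm
      subst haj
      have hjL : (j : Int) ∉ L := hni
      have hj1 : j < st.1.length := by exact_mod_cast ha1
      have hj2 : j < st.2.length := by exact_mod_cast ha2
      simp only [List.mem_cons, hjL, or_false]
      simp [pvBody, pvStep, List.getD_eq_getElem?_getD, hj1, hj2]
      split <;> simp [hj1, hj2]
    · have hne : a.toNat ≠ j := by omega
      have hent1 : (pvBody w g st a).1.getD j 0 = st.1.getD j 0 := by
        simp only [pvBody, PySem.List.pySetD_of_nonneg, ha0]
        split <;> simp [List.getD_eq_getElem?_getD, List.getElem?_set_ne hne]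
      have hent2 : (pvBody w g st a).2.getD j 0 = st.2.getD j 0 := by
        simp only [pvBody, PySem.List.pySetD_of_nonneg, ha0]
        split <;> simp [List.getD_eq_getElem?_getD, List.getElem?_set_ne hne]
      rw [hent1, hent2]
      simp only [List.mem_cons, hja, false_or]

-- Peeling one outer iteration changes window j exactly when j ≤ m < j + p.
lemma pvRun_succ (w : Int) (gains : List Int) (p : Int) (j m : Nat) :
    pvRun w gains p j (m + 1) =
      if j ≤ m ∧ (m : Int) < (j : Int) + p then
        pvStep w (pvRun w gains p j m) (gains.getD m 0)
      else pvRun w gains p j m := by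
  by_cases h : j ≤ m ∧ (m : Int) < (j : Int) + p
  · have hlen : pvWinLen p j (m + 1) = pvWinLen p j m + 1 := by unfold pvWinLen; omega
    have hidx : j + pvWinLen p j m = m := by unfold pvWinLen; omega
    rw [if_pos h]
    unfold pvRun pvWin
    rw [hlen, List.range'_1_concat, hidx, List.map_append, List.foldl_append]
    simp
  · have hlen : pvWinLen p j (m + 1) = pvWinLen p j m := by unfold pvWinLen; omega
    rw [if_neg h]
    unfold pvRun pvWin
    rw [hlen]

-- The invariant of A's outer loop.
lemma pvAState_spec (gains : List Int) (w p : Int) (m : Nat) (hm : m ≤ gains.length) :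
    ((pvAState gains w p m).1.length = gains.length ∧
     (pvAState gains w p m).2.length = gains.length) ∧
    ∀ j : Nat, ((pvAState gains w p m).1.getD j 0, (pvAState gains w p m).2.getD j 0) =
      pvRun w gains p j m := by
  induction m with
  | zero =>
    refine ⟨⟨?_, ?_⟩, ?_⟩
    · simp [pvAState]
    · simp [pvAState]
    · intro j
      simp [pvAState, pvRun, pvWin, show pvWinLen p j 0 = 0 by
        unfold pvWinLen; omega]
  | succ m ih =>
    obtain ⟨⟨h1, h2⟩, hent⟩ := ih (by omega)
    have hsplit : PySem.List.pyRange 0 ((m + 1 : Nat) : Int) 1 =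
        PySem.List.pyRange 0 (m : Int) 1 ++ [(m : Int)] := by
      push_cast
      exact PySem.List.pyRange_one_succ_right (by positivity)
    have hstate : pvAState gains w p (m + 1) =
        (PySem.List.pyRange (max 0 ((m : Int) - p + 1)) ((m : Int) + 1) 1).foldl
          (pvBody w (PySem.List.pyGetD gains (m : Int) 0)) (pvAState gains w p m) := by
      unfold pvAState
      rw [hsplit, List.foldl_append]
      rfl
    obtain ⟨hf1, hf2⟩ := pvFold_length w (PySem.List.pyGetD gains (m : Int) 0)
      (PySem.List.pyRange (max 0 ((m : Int) - p + 1)) ((m : Int) + 1) 1) (pvAState gains w p m)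
    refine ⟨⟨by rw [hstate, hf1, h1], by rw [hstate, hf2, h2]⟩, ?_⟩
    intro j
    rw [hstate]
    rw [pvInner w _ _ (PySem.List.nodup_pyRange_one _ _) _ ?side j]
    case side =>
      intro x hx
      rw [PySem.List.mem_pyRange_one] at hx
      exact ⟨by omega, by rw [h1]; omega, by rw [h2]; omega⟩
    rw [hent j, pvRun_succ]
    have hmem : ((j : Int) ∈ PySem.List.pyRange (max 0 ((m : Int) - p + 1)) ((m : Int) + 1) 1) ↔
        (j ≤ m ∧ (m : Int) < (j : Int) + p) := by
      rw [PySem.List.mem_pyRange_one]; omega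
    by_cases hj : j ≤ m ∧ (m : Int) < (j : Int) + p
    · rw [if_pos (hmem.mpr hj), if_pos hj]
      simp
    · rw [if_neg (fun h => hj (hmem.mp h)), if_neg hj]

lemma count_gains_alt_eq (gains : List Int) (w p : Int) :
    count_gains_alt gains w p =
      (PySem.List.pyRange 0 (gains.length : Int) 1).map
        (fun j => ((PySem.List.pyRange j (min (j + p) (gains.length : Int)) 1).foldl
          (fun (s : Int × Int) k => pvStep w s (PySem.List.pyGetD gains k 0)) (0, 0)).2) := by
  unfold count_gains_alt
  rw [PySem.List.foldl_append_singleton_eq_map]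
  rfl

lemma pvAlt_inner (gains : List Int) (w p : Int) (j : Nat) :
    ((PySem.List.pyRange (j : Int) (min ((j : Int) + p) (gains.length : Int)) 1).foldl
        (fun (s : Int × Int) k => pvStep w s (PySem.List.pyGetD gains k 0)) (0, 0)) =
      pvRun w gains p j gains.length := by
  rw [PySem.List.pyRange_one]
  unfold pvRun pvWin pvWinLen
  rw [List.range'_eq_map_range, List.foldl_map, List.map_map, List.foldl_map]
  apply PySem.List.foldl_congr_mem
  intro acc k _
  have hk : ((j : Int) + (k : Int)) = ((j + k : Nat) : Int) := by push_cast; ring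
  rw [hk, PySem.List.pyGetD_natCast]
  rfl

-- ===== VERDICT (by name: the statement is the Claim_ definition above) =====
theorem count_gains_spec : Claim_equal_count_gains := by
  intro gains w p _
  unfold Spec_count_gains
  rw [count_gains_eq_pvAState, count_gains_alt_eq]
  obtain ⟨⟨h1, h2⟩, hent⟩ := pvAState_spec gains w p gains.length le_rfl
  apply List.ext_getElem
  · simp [h2, PySem.List.length_pyRange_one]
  · intro i hi1 hi2
    rw [List.getElem_map]
    have hidx : ∀ hpf, (PySem.List.pyRange 0 (gains.length : Int) 1)[i]'hpf = ((i : Nat) : Int) := by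
      intro hpf
      rw [PySem.List.getElem_pyRange_one]
      ring
    rw [hidx, pvAlt_inner]
    have hlt : i < (pvAState gains w p gains.length).2.length := hi1
    rw [← List.getD_eq_getElem _ 0 hlt]
    exact congrArg Prod.snd (hent i)
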